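-- pv_equiv track=rewrite | github.com/ThanDongVanHoc/GDGOC-2026 | phase3/core/entity_graph.py | get_entity_subgraph
-- ===== SOURCE A (Python) =====
-- def get_entity_subgraph(
--     entity_graph: dict[str, dict],
--     entity_name: str,
--     max_depth: int = 3,
-- ) -> dict[str, dict]:
--     """Extract a subgraph centered on a specific entity.
--
--     Performs BFS from the given entity to collect all reachable
--     entities within max_depth hops. Useful for isolating the
--     impact zone of a localization proposal.
--
--     Args:
--         entity_graph: The full entity graph.
--         entity_name: The center entity to start from.
--         max_depth: Maximum BFS depth (default: 3).
--
--     Returns: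
--         A subset of the entity graph containing only entities
--         reachable within max_depth hops from entity_name.
--     """
--     if entity_name not in entity_graph:
--         return {}
--
--     subgraph: dict[str, dict] = {}
--     visited: set[str] = set()
--     queue: list[tuple[str, int]] = [(entity_name, 0)]
--
--     while queue:
--         current, depth = queue.pop(0)
--         if current in visited or depth > max_depth:
--             continue
--         visited.add(current)
--
--         if current in entity_graph:
--             subgraph[current] = entity_graph[current]
--             for related in entity_graph[current].get("related", []):
--                 if related not in visited:
--                     queue.append((related, depth + 1))
--
--     return subgraph
-- ===== SOURCE B (Python) =====
-- def get_entity_subgraph(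
--     entity_graph: dict[str, dict],
--     entity_name: str,
--     max_depth: int = 3,
-- ) -> dict[str, dict]:
--     """Two-phase reimplementation: a recursive level expansion first computes
--     the visit ORDER as a plain list of graph keys (no queue, no visited set,
--     no depth tags; neighbours absent from the graph are discarded at once,
--     since they can contribute nothing), then the result dict is built in one
--     comprehension over that order."""
--     if entity_name not in entity_graph:
--         return {}
--
--     def grow(order: list[str], frontier: list[str], budget: int) -> list[str]:
--         if budget <= 0 or not frontier:
--             return order
--         placed = set(order)
--         layer = []
--         for name in frontier:
--             if name in entity_graph and name not in placed:
--                 placed.add(name)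
--                 layer.append(name)
--         nxt = [r for n in layer for r in entity_graph[n].get("related", [])]
--         return grow(order + layer, nxt, budget - 1)
--
--     return {name: entity_graph[name] for name in grow([], [entity_name], max_depth + 1)}
-- ===== Notes on version B (the rewrite author's own statement) =====
-- stated objective: alternative
-- what changed: Replaces the single imperative loop over a pop(0) queue of (node, depth) pairs with a visited set and an incrementally built dict by a two-phase design: a recursive level-expansion helper computes only the visit ORDER as a list of graph keys (non-graph neighbours are discarded immediately instead of being queued and marked visited, and there is no depth tagging), and the result dict is then built in a single comprehension over that order.
import Mathlib
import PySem

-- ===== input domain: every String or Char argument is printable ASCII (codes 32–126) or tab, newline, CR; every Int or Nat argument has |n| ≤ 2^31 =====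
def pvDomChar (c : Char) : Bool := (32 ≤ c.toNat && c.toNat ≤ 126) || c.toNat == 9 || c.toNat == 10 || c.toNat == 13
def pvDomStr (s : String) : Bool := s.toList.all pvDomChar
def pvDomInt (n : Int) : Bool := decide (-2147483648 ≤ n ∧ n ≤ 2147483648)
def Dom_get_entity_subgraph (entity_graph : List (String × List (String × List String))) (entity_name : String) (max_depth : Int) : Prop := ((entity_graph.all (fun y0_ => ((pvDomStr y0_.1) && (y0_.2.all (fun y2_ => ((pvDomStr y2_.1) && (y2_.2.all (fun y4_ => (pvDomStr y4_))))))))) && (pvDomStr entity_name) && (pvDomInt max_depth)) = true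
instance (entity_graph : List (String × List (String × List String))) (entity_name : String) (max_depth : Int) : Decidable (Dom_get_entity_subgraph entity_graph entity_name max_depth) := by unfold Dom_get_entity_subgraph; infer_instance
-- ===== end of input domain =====

-- B replaces A's single imperative loop over a pop(0) queue of depth-tagged pairs (visited set,
-- dict built incrementally) by a two-phase design: a recursive level expansion computes the visit
-- order as a plain list of graph keys (non-graph neighbours dropped at once, no depth tags), then
-- the result dict is built in one pass over that order.

-- ===== PORT A =====

-- all names that can ever be appended to A's queue after the start node
def pvRelUniverse (g : PySem.Dict String (List (String × List String))) : List String :=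
  g.items.flatMap (fun kv => PySem.Dict.getD (PySem.Dict.mk kv.2) "related" [])

-- termination helpers for pvLoopA (cited in its decreasing_by)
theorem pvLexHelper {a b x y : Nat} (h1 : a ≤ b) (h2 : x < y) :
    Prod.Lex (fun m n : Nat => m < n) (fun m n : Nat => m < n) (a, x) (b, y) := by
  rcases lt_or_eq_of_le h1 with h | h
  · exact Prod.Lex.left _ _ h
  · subst h; exact Prod.Lex.right _ h2

theorem pvCardVisit (a : String) (N' N vis : Finset String)
    (hsub : N' ⊆ N) (haN : a ∈ N) (hav : a ∉ vis) :
    (N' \ insert a vis).card < (N \ vis).card := by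
  have h1 : N' \ insert a vis ⊆ (N \ vis).erase a := by
    intro y hy
    rcases Finset.mem_sdiff.mp hy with ⟨hyN, hyv⟩
    rw [Finset.mem_insert] at hyv
    push_neg at hyv
    exact Finset.mem_erase.mpr ⟨hyv.1, Finset.mem_sdiff.mpr ⟨hsub hyN, hyv.2⟩⟩
  have h2 : a ∈ N \ vis := Finset.mem_sdiff.mpr ⟨haN, hav⟩
  exact lt_of_le_of_lt (Finset.card_le_card h1) (Finset.card_lt_card (Finset.erase_ssubset h2))

theorem pvAddToFinset (vis : PySem.Set String) (a : String) (ha : a ∉ vis) :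
    (PySem.Set.add vis a).toFinset = insert a vis.toFinset := by
  rw [PySem.Set.add_of_not_mem ha]
  ext y; simp [List.mem_toFinset]

theorem pvRelSub (g : PySem.Dict String (List (String × List String))) (current : String)
    (info : List (String × List String)) (h : PySem.Dict.get? g current = some info) :
    ∀ r ∈ PySem.Dict.getD (PySem.Dict.mk info) "related" [], r ∈ pvRelUniverse g := by
  intro r hr
  have hm := PySem.Dict.mem_items_of_get?_eq_some g h
  exact List.mem_flatMap.mpr ⟨(current, info), hm, hr⟩

-- the while-loop of A: queue of (current, depth) pairs, pop(0)
def pvLoopA (g : PySem.Dict String (List (String × List String))) (max_depth : Int)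
    (sub : PySem.Dict String (List (String × List String))) (vis : PySem.Set String)
    (queue : List (String × Int)) : PySem.Dict String (List (String × List String)) :=
  match queue with
  | [] => sub
  | (current, depth) :: rest =>
    if current ∈ vis ∨ max_depth < depth then
      pvLoopA g max_depth sub vis rest
    else
      let vis' := PySem.Set.add vis current
      match hg : PySem.Dict.get? g current with
      | some info =>
          pvLoopA g max_depth (sub.insert current info) vis'
            (rest ++ ((PySem.Dict.getD (PySem.Dict.mk info) "related" []).filter
                (fun r => !PySem.Set.contains vis' r)).map (fun r => (r, depth + 1)))
      | none => pvLoopA g max_depth sub vis' rest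
  termination_by
    ((((queue.map Prod.fst).toFinset ∪ (pvRelUniverse g).toFinset) \ vis.toFinset).card,
      queue.length)
  decreasing_by
  · apply pvLexHelper
    · exact Finset.card_le_card (Finset.sdiff_subset_sdiff
        (Finset.union_subset_union_left (by simp [List.toFinset_cons]))
        (Finset.Subset.refl _))
    · simp
  · have hcond : ¬(current ∈ vis ∨ max_depth < depth) := by assumption
    push_neg at hcond
    apply Prod.Lex.left
    rw [pvAddToFinset vis current hcond.1]
    apply pvCardVisit
    · intro y hy
      simp only [List.map_append, List.map_map, List.toFinset_append, Finset.mem_union,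
        List.map_cons, List.toFinset_cons, Finset.mem_insert, List.mem_toFinset] at hy ⊢
      rcases hy with (hy | hy) | hy
      · exact Or.inl (Or.inr (by simpa using hy))
      · refine Or.inr ?_
        simp only [List.mem_map, Function.comp] at hy
        obtain ⟨r, hr, rfl⟩ := hy
        exact pvRelSub g current _ hg r (List.mem_filter.mp hr).1
      · exact Or.inr hy
    · simp
    · exact fun hm => hcond.1 (List.mem_toFinset.mp hm)
  · have hcond : ¬(current ∈ vis ∨ max_depth < depth) := by assumption
    push_neg at hcond
    apply Prod.Lex.left
    rw [pvAddToFinset vis current hcond.1]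
    apply pvCardVisit
    · exact Finset.union_subset_union_left (by simp [List.toFinset_cons])
    · simp
    · exact fun hm => hcond.1 (List.mem_toFinset.mp hm)

def get_entity_subgraph (entity_graph : List (String × List (String × List String))) (entity_name : String) (max_depth : Int) : List (String × List (String × List String)) :=
  let g := PySem.Dict.mk entity_graph
  if g.contains entity_name then
    (pvLoopA g max_depth PySem.Dict.empty [] [(entity_name, 0)]).items
  else []

-- ===== PORT B =====

-- body of B's inner for-loop: 'if name in entity_graph and name not in placed: placed.add; layer.append'
def pvLayerStep (g : PySem.Dict String (List (String × List String)))
    (st : PySem.Set String × List String) (name : String) : PySem.Set String × List String :=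
  if g.contains name = true ∧ name ∉ st.1 then (PySem.Set.add st.1 name, st.2 ++ [name]) else st

-- entity_graph[n].get("related", []); n is always a key of g where this is called, so getD is exact
def pvRelOf (g : PySem.Dict String (List (String × List String))) (n : String) : List String :=
  PySem.Dict.getD (PySem.Dict.mk (PySem.Dict.getD g n [])) "related" []

-- B's recursive helper 'grow'
def pvGrow (g : PySem.Dict String (List (String × List String)))
    (order frontier : List String) (budget : Int) : List String :=
  if h : budget ≤ 0 ∨ frontier = [] then order
  else
    let st := frontier.foldl (pvLayerStep g) (PySem.Set.ofList order, [])
    pvGrow g (order ++ st.2) (st.2.flatMap (pvRelOf g)) (budget - 1)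
  termination_by budget.toNat
  decreasing_by push_neg at h; omega

def get_entity_subgraph_alt (entity_graph : List (String × List (String × List String))) (entity_name : String) (max_depth : Int) : List (String × List (String × List String)) :=
  let g := PySem.Dict.mk entity_graph
  if g.contains entity_name then
    -- the final dict comprehension; every name in the order is a key of g, so getD is exact
    ((pvGrow g [] [entity_name] (max_depth + 1)).foldl
        (fun d n => d.insert n (PySem.Dict.getD g n [])) PySem.Dict.empty).items
  else []

-- ===== PRECONDITION & SPEC =====
def Spec_get_entity_subgraph (entity_graph : List (String × List (String × List String))) (entity_name : String) (max_depth : Int) (out : List (String × List (String × List String))) : Prop := out = get_entity_subgraph_alt entity_graph entity_name max_depth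
instance (entity_graph : List (String × List (String × List String))) (entity_name : String) (max_depth : Int) (out : List (String × List (String × List String))) : Decidable (Spec_get_entity_subgraph entity_graph entity_name max_depth out) := by unfold Spec_get_entity_subgraph; infer_instance

-- ===== CLAIM (what is proved, stated in full; the proofs are below) =====
def Claim_equal_get_entity_subgraph : Prop := ∀ (entity_graph : List (String × List (String × List String))) (entity_name : String) (max_depth : Int), Dom_get_entity_subgraph entity_graph entity_name max_depth → Spec_get_entity_subgraph entity_graph entity_name max_depth (get_entity_subgraph entity_graph entity_name max_depth)

-- ===== LEMMAS AND PROOFS =====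

-- the dict B builds over an order list (definitionally the fold in get_entity_subgraph_alt)
def pvDictOf (g : PySem.Dict String (List (String × List String))) (l : List String) :
    PySem.Dict String (List (String × List String)) :=
  l.foldl (fun d n => d.insert n (PySem.Dict.getD g n [])) PySem.Dict.empty

theorem pvDictOf_snoc (g : PySem.Dict String (List (String × List String))) (l : List String)
    (x : String) : pvDictOf g (l ++ [x]) = (pvDictOf g l).insert x (PySem.Dict.getD g x []) := by
  simp [pvDictOf]

-- proof-side intermediate form: A's loop regrouped level by level
def pvStepB (g : PySem.Dict String (List (String × List String)))
    (st : PySem.Dict String (List (String × List String)) × PySem.Set String × List String)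
    (node : String) :
    PySem.Dict String (List (String × List String)) × PySem.Set String × List String :=
  if node ∈ st.2.1 then st
  else
    let vis' := PySem.Set.add st.2.1 node
    match PySem.Dict.get? g node with
    | some info =>
        (st.1.insert node info, vis',
          st.2.2 ++ (PySem.Dict.getD (PySem.Dict.mk info) "related" []).filter
            (fun r => !PySem.Set.contains vis' r))
    | none => (st.1, vis', st.2.2)

def pvLoopB (g : PySem.Dict String (List (String × List String))) (max_depth : Int)
    (sub : PySem.Dict String (List (String × List String))) (vis : PySem.Set String)
    (frontier : List String) (depth : Int) : PySem.Dict String (List (String × List String)) :=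
  if frontier = [] ∨ max_depth < depth then sub
  else
    let st := frontier.foldl (pvStepB g) (sub, vis, [])
    pvLoopB g max_depth st.1 st.2.1 st.2.2 (depth + 1)
  termination_by (max_depth + 1 - depth).toNat
  decreasing_by omega

-- once every queued depth exceeds max_depth, A only drains the queue
theorem pvLoopA_deep (g : PySem.Dict String (List (String × List String))) (md : Int)
    (sub : PySem.Dict String (List (String × List String))) (vis : PySem.Set String)
    (queue : List (String × Int)) (h : ∀ p ∈ queue, md < p.2) :
    pvLoopA g md sub vis queue = sub := by
  induction queue with
  | nil => rw [pvLoopA]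
  | cons p rest ih =>
    obtain ⟨c, d⟩ := p
    rw [pvLoopA]
    rw [if_pos (Or.inr (h (c, d) (by simp)))]
    exact ih (fun q hq => h q (List.mem_cons_of_mem _ hq))

-- stage 1: A's queue 'current level rest ++ next level' versus the level-by-level fold
theorem pvMain (g : PySem.Dict String (List (String × List String))) (md : Int)
    (rest nxt : List String) (sub : PySem.Dict String (List (String × List String)))
    (vis : PySem.Set String) (d : Int) (hd : d ≤ md) :
    pvLoopA g md sub vis (rest.map (fun s => (s, d)) ++ nxt.map (fun s => (s, d + 1))) =
      pvLoopB g md (rest.foldl (pvStepB g) (sub, vis, nxt)).1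
        (rest.foldl (pvStepB g) (sub, vis, nxt)).2.1
        (rest.foldl (pvStepB g) (sub, vis, nxt)).2.2 (d + 1) := by
  match rest with
  | [] =>
    simp only [List.map_nil, List.nil_append, List.foldl_nil]
    by_cases hn : nxt = []
    · subst hn
      rw [pvLoopB, if_pos (Or.inl rfl)]
      simp only [List.map_nil]
      rw [pvLoopA]
    · by_cases hmd : d + 1 ≤ md
      · have ih := pvMain g md nxt [] sub vis (d + 1) hmd
        rw [pvLoopB, if_neg (by push_neg; exact ⟨hn, by omega⟩)]
        simpa using ih
      · rw [pvLoopB, if_pos (Or.inr (by omega))]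
        apply pvLoopA_deep
        intro p hp
        simp only [List.mem_map] at hp
        obtain ⟨s, -, rfl⟩ := hp
        omega
  | x :: xs =>
    simp only [List.map_cons, List.cons_append, List.foldl_cons]
    rw [pvLoopA]
    by_cases hx : x ∈ vis
    · rw [if_pos (Or.inl hx)]
      have hstep : pvStepB g (sub, vis, nxt) x = (sub, vis, nxt) := by
        simp [pvStepB, hx]
      rw [hstep]
      exact pvMain g md xs nxt sub vis d hd
    · rw [if_neg (by push_neg; exact ⟨hx, by omega⟩)]
      cases hgx : PySem.Dict.get? g x with
      | some info =>
        have hstep : pvStepB g (sub, vis, nxt) x =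
            (sub.insert x info, PySem.Set.add vis x,
              nxt ++ (PySem.Dict.getD (PySem.Dict.mk info) "related" []).filter
                (fun r => !PySem.Set.contains (PySem.Set.add vis x) r)) := by
          simp only [pvStepB, if_neg hx, hgx]
        rw [hstep]
        have ih := pvMain g md xs
          (nxt ++ (PySem.Dict.getD (PySem.Dict.mk info) "related" []).filter
            (fun r => !PySem.Set.contains (PySem.Set.add vis x) r))
          (sub.insert x info) (PySem.Set.add vis x) d hd
        simpa [List.map_append, List.append_assoc] using ih
      | none =>
        have hstep : pvStepB g (sub, vis, nxt) x = (sub, PySem.Set.add vis x, nxt) := by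
          simp only [pvStepB, if_neg hx, hgx]
        rw [hstep]
        have ih := pvMain g md xs nxt sub (PySem.Set.add vis x) d hd
        exact ih
  termination_by ((md + 1 - d).toNat, rest.length)
  decreasing_by
  · exact Prod.Lex.left _ _ (by omega)
  · exact Prod.Lex.right _ (by simp)
  · exact Prod.Lex.right _ (by simp)
  · exact Prod.Lex.right _ (by simp)

-- 'fA is fB with some elements, each already visited, dropped'
inductive pvFr (vis : PySem.Set String) : List String → List String → Prop
  | nil : pvFr vis [] []
  | keep (x : String) {a b : List String} : pvFr vis a b → pvFr vis (x :: a) (x :: b)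
  | drop (x : String) {a b : List String} : x ∈ vis → pvFr vis a b → pvFr vis a (x :: b)

theorem pvFr_mono {v w : PySem.Set String} (hvw : ∀ x ∈ v, x ∈ w)
    {a b : List String} (h : pvFr v a b) : pvFr w a b := by
  induction h with
  | nil => exact pvFr.nil
  | keep x _ ih => exact pvFr.keep x ih
  | drop x hx _ ih => exact pvFr.drop x (hvw x hx) ih

theorem pvFr_append {v : PySem.Set String} {a b a' b' : List String}
    (h : pvFr v a b) (h' : pvFr v a' b') : pvFr v (a ++ a') (b ++ b') := by
  induction h with
  | nil => simpa using h'
  | keep x _ ih => exact pvFr.keep x ih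
  | drop x hx _ ih => exact pvFr.drop x hx ih

theorem pvFr_filter {v : PySem.Set String} (p : String → Bool) (l : List String)
    (h : ∀ x ∈ l, ¬ p x = true → x ∈ v) : pvFr v (l.filter p) l := by
  induction l with
  | nil => exact pvFr.nil
  | cons x xs ih =>
    by_cases hp : p x = true
    · rw [List.filter_cons_of_pos hp]
      exact pvFr.keep x (ih (fun y hy => h y (List.mem_cons_of_mem _ hy)))
    · rw [List.filter_cons_of_neg (by simpa using hp)]
      exact pvFr.drop x (h x (by simp) hp) (ih (fun y hy => h y (List.mem_cons_of_mem _ hy)))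

theorem pvFr_nil_left {v : PySem.Set String} {b : List String} (h : pvFr v [] b) :
    ∀ x ∈ b, x ∈ v := by
  generalize ha : ([] : List String) = a at h
  induction h with
  | nil => simp
  | keep x _ _ => simp at ha
  | drop x hx _ ih =>
    intro y hy
    rcases List.mem_cons.mp hy with rfl | hy
    · exact hx
    · exact ih ha y hy

theorem pvFr_nil_right {v : PySem.Set String} {a : List String} (h : pvFr v a []) : a = [] := by
  cases h; rfl

-- stage 2, fold level: A's per-level fold versus B's layer fold, related by pvFr
theorem pvFold (g : PySem.Dict String (List (String × List String)))
    {vis0 : PySem.Set String} {fA fB : List String} (hfr : pvFr vis0 fA fB)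
    (order : List String) :
    ∀ (vis placed : PySem.Set String) (layer nxtA : List String),
    (∀ x ∈ vis0, x ∈ vis) →
    (∀ n, g.contains n = true → (n ∈ vis ↔ n ∈ order ++ layer)) →
    (∀ n, n ∈ placed ↔ n ∈ order ++ layer) →
    (order ++ layer).Nodup →
    (∀ n ∈ order ++ layer, g.contains n = true) →
    pvFr vis nxtA (layer.flatMap (pvRelOf g)) →
    ∃ layer',
      (fB.foldl (pvLayerStep g) (placed, layer)).2 = layer ++ layer' ∧
      (fA.foldl (pvStepB g) (pvDictOf g (order ++ layer), vis, nxtA)).1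
        = pvDictOf g (order ++ (layer ++ layer')) ∧
      (∀ n, g.contains n = true →
        ((n ∈ (fA.foldl (pvStepB g) (pvDictOf g (order ++ layer), vis, nxtA)).2.1)
          ↔ n ∈ order ++ (layer ++ layer'))) ∧
      (order ++ (layer ++ layer')).Nodup ∧
      (∀ n ∈ order ++ (layer ++ layer'), g.contains n = true) ∧
      pvFr (fA.foldl (pvStepB g) (pvDictOf g (order ++ layer), vis, nxtA)).2.1
        (fA.foldl (pvStepB g) (pvDictOf g (order ++ layer), vis, nxtA)).2.2
        ((layer ++ layer').flatMap (pvRelOf g)) := by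
  induction hfr with
  | nil =>
    intro vis placed layer nxtA hv0 hvis hpl hnd hg hnxt
    exact ⟨[], by simp, by simp, by simpa using hvis, by simpa using hnd,
      by simpa using hg, by simpa using hnxt⟩
  | @keep x a b hab ih =>
    intro vis placed layer nxtA hv0 hvis hpl hnd hg hnxt
    simp only [List.foldl_cons]
    by_cases hx : x ∈ vis
    · have hA : pvStepB g (pvDictOf g (order ++ layer), vis, nxtA) x
          = (pvDictOf g (order ++ layer), vis, nxtA) := by simp [pvStepB, hx]
      have hB : pvLayerStep g (placed, layer) x = (placed, layer) := by
        by_cases hcx : g.contains x = true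
        · have : x ∈ placed := (hpl x).mpr ((hvis x hcx).mp hx)
          simp [pvLayerStep, this]
        · simp [pvLayerStep, hcx]
      rw [hA, hB]
      exact ih vis placed layer nxtA hv0 hvis hpl hnd hg hnxt
    · cases hgx : PySem.Dict.get? g x with
      | some info =>
        have hcx : g.contains x = true := by
          rw [PySem.Dict.contains_eq_isSome_get?, hgx]; rfl
        have hxo : x ∉ order ++ layer := fun hmem => hx ((hvis x hcx).mpr hmem)
        have hA : pvStepB g (pvDictOf g (order ++ layer), vis, nxtA) x
            = ((pvDictOf g (order ++ layer)).insert x info, PySem.Set.add vis x,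
              nxtA ++ (PySem.Dict.getD (PySem.Dict.mk info) "related" []).filter
                (fun r => !PySem.Set.contains (PySem.Set.add vis x) r)) := by
          simp only [pvStepB, if_neg hx, hgx]
        have hB : pvLayerStep g (placed, layer) x
            = (PySem.Set.add placed x, layer ++ [x]) := by
          have : x ∉ placed := fun hmem => hxo ((hpl x).mp hmem)
          simp [pvLayerStep, hcx, this]
        rw [hA, hB]
        have hinfo : PySem.Dict.getD g x [] = info := PySem.Dict.getD_of_get?_eq_some g [] hgx
        have hdict : (pvDictOf g (order ++ layer)).insert x info
            = pvDictOf g (order ++ (layer ++ [x])) := by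
          rw [show order ++ (layer ++ [x]) = (order ++ layer) ++ [x] by simp,
            pvDictOf_snoc, hinfo]
        have hrel : (PySem.Dict.getD (PySem.Dict.mk info) "related" []) = pvRelOf g x := by
          rw [pvRelOf, hinfo]
        have hv0' : ∀ y ∈ vis0, y ∈ PySem.Set.add vis x :=
          fun y hy => (PySem.Set.mem_add vis x y).mpr (Or.inl (hv0 y hy))
        obtain ⟨layer', h1, h2, h3, h4, h5, h6⟩ := ih (PySem.Set.add vis x)
          (PySem.Set.add placed x) (layer ++ [x])
          (nxtA ++ (PySem.Dict.getD (PySem.Dict.mk info) "related" []).filter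
            (fun r => !PySem.Set.contains (PySem.Set.add vis x) r))
          hv0'
          (by
            intro n hn
            rw [PySem.Set.mem_add vis x n, hvis n hn]
            simp [or_assoc])
          (by
            intro n
            rw [PySem.Set.mem_add placed x n, hpl n]
            simp [or_assoc])
          (by
            rw [show order ++ (layer ++ [x]) = (order ++ layer) ++ [x] by simp,
              List.nodup_append_comm]
            simpa using List.nodup_cons.mpr ⟨hxo, hnd⟩)
          (by
            intro n hn
            simp only [List.mem_append, List.mem_singleton] at hn
            rcases hn with h | h | rfl
            · exact hg n (List.mem_append.mpr (Or.inl h))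
            · exact hg n (List.mem_append.mpr (Or.inr h))
            · exact hcx)
          (by
            rw [List.flatMap_append]
            refine pvFr_append (pvFr_mono (fun y hy => (PySem.Set.mem_add vis x y).mpr (Or.inl hy)) hnxt) ?_
            simp only [List.flatMap_cons, List.flatMap_nil, List.append_nil, ← hrel]
            apply pvFr_filter
            intro r _ hr
            simp only [Bool.not_eq_true', Bool.not_eq_false] at hr
            exact (PySem.Set.contains_iff _ r).mp hr)
        rw [hdict]
        refine ⟨x :: layer', ?_, ?_, ?_, ?_, ?_, ?_⟩
        · simpa using h1
        · simpa using h2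
        · simpa using h3
        · simpa using h4
        · simpa using h5
        · simpa using h6
      | none =>
        have hcx : g.contains x = false := by
          rw [PySem.Dict.contains_eq_isSome_get?, hgx]; rfl
        have hA : pvStepB g (pvDictOf g (order ++ layer), vis, nxtA) x
            = (pvDictOf g (order ++ layer), PySem.Set.add vis x, nxtA) := by
          simp only [pvStepB, if_neg hx, hgx]
        have hB : pvLayerStep g (placed, layer) x = (placed, layer) := by
          simp [pvLayerStep, hcx]
        rw [hA, hB]
        refine ih (PySem.Set.add vis x) placed layer nxtA
          (fun y hy => (PySem.Set.mem_add vis x y).mpr (Or.inl (hv0 y hy))) ?_ hpl hnd hg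
          (pvFr_mono (fun y hy => (PySem.Set.mem_add vis x y).mpr (Or.inl hy)) hnxt)
        intro n hn
        rw [PySem.Set.mem_add vis x n, hvis n hn]
        constructor
        · rintro (hm | rfl)
          · exact hm
          · rw [hn] at hcx; simp at hcx
        · exact fun hm => Or.inl hm
  | @drop x a b hx0 hab ih =>
    intro vis placed layer nxtA hv0 hvis hpl hnd hg hnxt
    simp only [List.foldl_cons]
    have hxv : x ∈ vis := hv0 x hx0
    have hB : pvLayerStep g (placed, layer) x = (placed, layer) := by
      by_cases hcx : g.contains x = true
      · have : x ∈ placed := (hpl x).mpr ((hvis x hcx).mp hxv)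
        simp [pvLayerStep, this]
      · simp [pvLayerStep, hcx]
    rw [hB]
    exact ih vis placed layer nxtA hv0 hvis hpl hnd hg hnxt

-- a frontier of only already-placed or non-graph names produces nothing
theorem pvLayer_junk (g : PySem.Dict String (List (String × List String)))
    (fB : List String) (placed : PySem.Set String) (layer : List String)
    (h : ∀ x ∈ fB, g.contains x = true → x ∈ placed) :
    fB.foldl (pvLayerStep g) (placed, layer) = (placed, layer) := by
  induction fB with
  | nil => rfl
  | cons x xs ih =>
    have hstep : pvLayerStep g (placed, layer) x = (placed, layer) := by
      by_cases hcx : g.contains x = true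
      · simp [pvLayerStep, h x (by simp) hcx]
      · simp [pvLayerStep, hcx]
    rw [List.foldl_cons, hstep]
    exact ih (fun y hy => h y (List.mem_cons_of_mem _ hy))

theorem pvGrow_junk (g : PySem.Dict String (List (String × List String)))
    (order fB : List String) (k : Int)
    (h : ∀ x ∈ fB, g.contains x = true → x ∈ order) :
    pvGrow g order fB k = order := by
  rw [pvGrow]
  by_cases hk : k ≤ 0 ∨ fB = []
  · rw [dif_pos hk]
  · rw [dif_neg hk]
    have hfold : fB.foldl (pvLayerStep g) (PySem.Set.ofList order, []) =
        (PySem.Set.ofList order, []) :=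
      pvLayer_junk g fB _ []
        (fun x hx hgx => (PySem.Set.mem_ofList order x).mpr (h x hx hgx))
    rw [hfold]
    simp only [List.flatMap_nil, List.append_nil]
    rw [pvGrow, dif_pos (Or.inr rfl)]

-- stage 2, level recursion: the level fold loop equals B's recursive grow
theorem pvStage2 (g : PySem.Dict String (List (String × List String))) (md : Int) :
    ∀ (k : Nat) (d : Int), k = (md + 1 - d).toNat →
    ∀ (order fA fB : List String) (vis : PySem.Set String),
    (∀ n, g.contains n = true → (n ∈ vis ↔ n ∈ order)) →
    order.Nodup →
    (∀ n ∈ order, g.contains n = true) →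
    pvFr vis fA fB →
    pvLoopB g md (pvDictOf g order) vis fA d = pvDictOf g (pvGrow g order fB (md + 1 - d)) := by
  intro k
  induction k with
  | zero =>
    intro d hk order fA fB vis hvis hnd hg hfr
    have hd : md < d := by omega
    rw [pvLoopB, if_pos (Or.inr hd), pvGrow, dif_pos (Or.inl (by omega))]
  | succ k ih =>
    intro d hk order fA fB vis hvis hnd hg hfr
    have hd : d ≤ md := by omega
    match fA with
    | [] =>
      rw [pvLoopB, if_pos (Or.inl rfl)]
      rw [pvGrow_junk g order fB _ (fun x hx hgx => (hvis x hgx).mp (pvFr_nil_left hfr x hx))]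
    | a :: as =>
      have hfB : fB ≠ [] := fun hb => by
        rw [hb] at hfr; exact absurd (pvFr_nil_right hfr) (by simp)
      rw [pvLoopB, if_neg (by push_neg; exact ⟨by simp, by omega⟩)]
      rw [pvGrow, dif_neg (by push_neg; exact ⟨by omega, hfB⟩)]
      obtain ⟨layer', h1, h2, h3, h4, h5, h6⟩ :=
        pvFold g hfr order vis (PySem.Set.ofList order) [] []
          (fun x hx => hx)
          (by simpa using hvis)
          (by intro n; simpa using PySem.Set.mem_ofList order n)
          (by simpa using hnd)
          (by simpa using hg)
          (by simpa using pvFr.nil)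
      simp only [List.append_nil] at h1 h2 h3 h4 h5 h6
      simp only [List.nil_append] at h1 h2 h3 h4 h5 h6
      have harg : md + 1 - d - 1 = md + 1 - (d + 1) := by omega
      show pvLoopB g md ((a :: as).foldl (pvStepB g) (pvDictOf g order, vis, [])).1
          ((a :: as).foldl (pvStepB g) (pvDictOf g order, vis, [])).2.1
          ((a :: as).foldl (pvStepB g) (pvDictOf g order, vis, [])).2.2 (d + 1)
        = pvDictOf g (pvGrow g
            (order ++ (fB.foldl (pvLayerStep g) (PySem.Set.ofList order, [])).2)
            (List.flatMap (pvRelOf g) (fB.foldl (pvLayerStep g) (PySem.Set.ofList order, [])).2)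
            (md + 1 - d - 1))
      rw [h1, h2, harg]
      exact ih (d + 1) (by omega) (order ++ layer') _ _ _ h3 h4 h5 h6

-- ===== VERDICT (by name: the statement is the Claim_ definition above) =====
theorem get_entity_subgraph_spec : Claim_equal_get_entity_subgraph := by
  intro eg name md _
  unfold Spec_get_entity_subgraph get_entity_subgraph get_entity_subgraph_alt
  by_cases hc : (PySem.Dict.mk eg).contains name
  · simp only [hc, if_true]
    by_cases h0 : (0 : Int) ≤ md
    · have h := pvMain (PySem.Dict.mk eg) md [name] [] PySem.Dict.empty [] 0 h0
      simp only [List.map_cons, List.map_nil, List.append_nil, List.foldl_cons,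
        List.foldl_nil] at h
      rw [h]
      have h2 : pvLoopB (PySem.Dict.mk eg) md PySem.Dict.empty [] [name] 0 =
          pvLoopB (PySem.Dict.mk eg) md (pvStepB (PySem.Dict.mk eg) (PySem.Dict.empty, [], []) name).1
            (pvStepB (PySem.Dict.mk eg) (PySem.Dict.empty, [], []) name).2.1
            (pvStepB (PySem.Dict.mk eg) (PySem.Dict.empty, [], []) name).2.2 (0 + 1) := by
        rw [pvLoopB, if_neg (by push_neg; exact ⟨by simp, by omega⟩)]
        simp only [List.foldl_cons, List.foldl_nil]
      rw [← h2]
      have h3 := pvStage2 (PySem.Dict.mk eg) md (md + 1 - 0).toNat 0 rfl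
        [] [name] [name] []
        (by intro n _; simp)
        (by simp)
        (by simp)
        (pvFr.keep name pvFr.nil)
      rw [show (pvDictOf (PySem.Dict.mk eg) [] : PySem.Dict String (List (String × List String)))
          = PySem.Dict.empty from rfl] at h3
      rw [h3]
      rw [show md + 1 - 0 = md + 1 by omega]
      rfl
    · push_neg at h0
      rw [pvLoopA, if_pos (Or.inr h0), pvLoopA]
      rw [pvGrow, dif_pos (Or.inl (by omega))]
      rfl
  · simp only [hc]
    simp
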